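-- pv_equiv track=rewrite | github.com/YuriiPaziuk/leetcode | greedy/Celebration party groups.py | subgroups_brute_force
-- ===== SOURCE A (Python) =====
-- def subgroups_brute_force(ages, valid_subgroups):
--     """
--     All solutions, brute force approach.
--     :param ages: dict(str: int), name -> age
--     :param valid_subgroups:  list(tuple(str)), tuples of names
--     :return: list(tuple(str))
--     """
--     import itertools
--     result = []
--     for nof_subgroups in range(1, len(valid_subgroups) + 1):
--         for groups in itertools.combinations(valid_subgroups, nof_subgroups):
--             children_in_groups = [x for group in groups for x in group]
--             # Check if all children are in children_in_groups
--             if len(set(children_in_groups)) == len(children_in_groups) == len(ages):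
--                 result.append(groups)
--     return result
-- ===== SOURCE B (Python) =====
-- def subgroups_brute_force(ages, valid_subgroups):
--     """Backtracking exact-cover search over group indices with disjointness
--     and size pruning; solutions bucketed by size to match brute-force order."""
--     n = len(valid_subgroups)
--     target = len(ages)
--
--     def dfs(i, used, count):
--         # returns, in include-first index order, every list of groups chosen
--         # from index i onward whose children stay pairwise distinct (and
--         # distinct from `used`) and bring the running count exactly to target
--         if i == n:
--             return [[]] if count == target else []
--         g = valid_subgroups[i]
--         members = frozenset(g)
--         out = []
--         if (len(members) == len(g) and used.isdisjoint(members)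
--                 and count + len(g) <= target):
--             for rest in dfs(i + 1, used | members, count + len(g)):
--                 out.append([g] + rest)
--         out.extend(dfs(i + 1, used, count))
--         return out
--
--     sols = [s for s in dfs(0, frozenset(), 0) if s]
--     result = []
--     for k in range(1, n + 1):
--         result.extend(tuple(s) for s in sols if len(s) == k)
--     return result
-- ===== Notes on version B (the rewrite author's own statement) =====
-- stated objective: faster
-- what changed: A tests every one of the 2^n combinations of groups (enumerated size by size); B runs a single pruned backtracking exact-cover search over group indices, cutting a branch as soon as a chosen group repeats a child or overflows the child count, then buckets the solutions by size to reproduce A's output order.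
import Mathlib
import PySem

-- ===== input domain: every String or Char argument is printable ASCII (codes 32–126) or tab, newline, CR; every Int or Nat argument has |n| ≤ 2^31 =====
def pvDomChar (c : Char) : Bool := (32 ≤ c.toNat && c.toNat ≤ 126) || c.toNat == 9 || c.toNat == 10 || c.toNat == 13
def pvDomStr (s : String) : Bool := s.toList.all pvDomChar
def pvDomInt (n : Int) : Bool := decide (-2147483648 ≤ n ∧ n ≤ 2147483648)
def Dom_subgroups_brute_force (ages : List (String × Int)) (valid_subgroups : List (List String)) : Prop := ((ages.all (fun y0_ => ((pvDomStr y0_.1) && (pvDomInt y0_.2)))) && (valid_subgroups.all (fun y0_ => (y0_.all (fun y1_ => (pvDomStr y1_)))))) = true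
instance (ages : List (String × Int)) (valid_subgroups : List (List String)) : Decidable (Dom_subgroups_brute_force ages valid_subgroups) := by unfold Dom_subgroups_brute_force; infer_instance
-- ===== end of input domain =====

-- B replaces A's scan of all C(n,k) combinations for every k by a single pruned
-- backtracking (exact-cover) search over group indices, bucketing solutions by size.

-- ===== PORT A =====
-- itertools.combinations(xs, k), tuples in itertools' lexicographic index order
def pvCombos : Nat → List (List String) → List (List (List String))
  | 0, _ => [[]]
  | _ + 1, [] => []
  | k + 1, x :: xs => (pvCombos k xs).map (x :: ·) ++ pvCombos (k + 1) xs

def subgroups_brute_force (ages : List (String × Int)) (valid_subgroups : List (List String)) : List (List (List String)) :=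
  let agesLen := (PySem.Dict.ofList ages).size   -- len(ages): ages is a dict (distinct keys)
  (List.range valid_subgroups.length).foldl (fun result k0 =>
    (pvCombos (k0 + 1) valid_subgroups).foldl (fun r groups =>
      let children := groups.flatMap id
      if (PySem.Set.ofList children).length == children.length && children.length == agesLen
      then r ++ [groups] else r) result) []

-- ===== PORT B =====
-- dfs(i, used, count) from Source B: all suffix choices from the remaining groups
def pvDfs (target : Nat) : List (List String) → PySem.Set String → Nat → List (List (List String))
  | [], _, count => if count == target then [[]] else []
  | g :: vs, used, count =>
      let members := PySem.Set.ofList g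
      (if members.length == g.length && PySem.Set.isdisjoint used members
          && decide (count + g.length ≤ target)
       then (pvDfs target vs (PySem.Set.union used members) (count + g.length)).map (g :: ·)
       else [])
      ++ pvDfs target vs used count

def subgroups_brute_force_alt (ages : List (String × Int)) (valid_subgroups : List (List String)) : List (List (List String)) :=
  let target := (PySem.Dict.ofList ages).size
  let sols := (pvDfs target valid_subgroups PySem.Set.empty 0).filter (fun s => !s.isEmpty)
  (List.range valid_subgroups.length).foldl (fun result k0 =>
    result ++ sols.filter (fun s => s.length == k0 + 1)) []

-- ===== PRECONDITION & SPEC =====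
def Spec_subgroups_brute_force (ages : List (String × Int)) (valid_subgroups : List (List String)) (out : List (List (List String))) : Prop := out = subgroups_brute_force_alt ages valid_subgroups
instance (ages : List (String × Int)) (valid_subgroups : List (List String)) (out : List (List (List String))) : Decidable (Spec_subgroups_brute_force ages valid_subgroups out) := by unfold Spec_subgroups_brute_force; infer_instance

-- ===== CLAIM (what is proved, stated in full; the proofs are below) =====
def Claim_equal_subgroups_brute_force : Prop := ∀ (ages : List (String × Int)) (valid_subgroups : List (List String)), Dom_subgroups_brute_force ages valid_subgroups → Spec_subgroups_brute_force ages valid_subgroups (subgroups_brute_force ages valid_subgroups)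

-- ===== LEMMAS AND PROOFS =====

-- all sub-multisets of the list of groups, include-first (= DFS leaf) order
def pvSubs : List (List String) → List (List (List String))
  | [] => [[]]
  | g :: vs => (pvSubs vs).map (g :: ·) ++ pvSubs vs

-- the predicate pvDfs target vs used count enumerates (over choices s from vs)
def pvCheck (target : Nat) (used : List String) (count : Nat) (s : List (List String)) : Bool :=
  decide ((s.flatMap id).Nodup ∧ (∀ x ∈ used, x ∉ s.flatMap id)
            ∧ count + (s.flatMap id).length = target)

lemma pv_discard_eq_filter (s : List String) (x : String) :
    PySem.Set.discard s x = s.filter (fun y => !(y == x)) := by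
  simp [PySem.Set.discard]

lemma pv_ofList_length_lt {xs : List String} (h : ¬ xs.Nodup) :
    (PySem.Set.ofList xs).length < xs.length := by
  induction xs with
  | nil => simp at h
  | cons x xs ih =>
    rw [PySem.Set.ofList_cons, pv_discard_eq_filter]
    by_cases hx : xs.Nodup
    · have hmem : x ∈ xs := by
        by_contra hnx
        exact h (List.nodup_cons.mpr ⟨hnx, hx⟩)
      rw [PySem.Set.ofList_eq_self_of_nodup xs hx]
      have : (xs.filter (fun y => !(y == x))).length < xs.length := by
        apply List.length_filter_lt_length_iff_exists.mpr
        exact ⟨x, hmem, by simp⟩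
      simpa using Nat.succ_lt_succ this
    · have h1 := ih hx
      have h2 : ((PySem.Set.ofList xs).filter (fun y => !(y == x))).length
          ≤ (PySem.Set.ofList xs).length := List.length_filter_le _ _
      simpa using Nat.succ_lt_succ (lt_of_le_of_lt h2 h1)

lemma pv_set_len_iff (xs : List String) :
    ((PySem.Set.ofList xs).length = xs.length) ↔ xs.Nodup := by
  constructor
  · intro h
    by_contra hn
    exact absurd h (Nat.ne_of_lt (pv_ofList_length_lt hn))
  · intro h; rw [PySem.Set.ofList_eq_self_of_nodup xs h]

lemma pv_subs_filter_len (vs : List (List String)) :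
    ∀ k : Nat, (pvSubs vs).filter (fun s => s.length == k) = pvCombos k vs := by
  induction vs with
  | nil => intro k; cases k <;> simp [pvSubs, pvCombos]
  | cons g vs ih =>
    intro k
    simp only [pvSubs]
    rw [List.filter_append, List.filter_map]
    cases k with
    | zero =>
      have h1 : ((pvSubs vs).filter ((fun s => s.length == 0) ∘ (g :: ·))) = [] := by
        apply List.filter_eq_nil_iff.mpr; intro s _; simp
      rw [h1, ih 0]
      simp [pvCombos]
    | succ k =>
      have h1 : ((fun (s : List (List String)) => s.length == k + 1) ∘ (g :: ·))
          = fun s => s.length == k := by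
        funext s; simp
      rw [h1, ih k, ih (k + 1)]
      rfl

lemma pv_dfs_eq (target : Nat) :
    ∀ (vs : List (List String)) (used : PySem.Set String) (count : Nat), used.Nodup →
      pvDfs target vs used count = (pvSubs vs).filter (pvCheck target used count) := by
  intro vs
  induction vs with
  | nil =>
    intro used count _
    by_cases h : count = target <;> simp [pvDfs, pvSubs, pvCheck, h]
  | cons g vs ih =>
    intro used count hu
    simp only [pvDfs, pvSubs]
    rw [List.filter_append, List.filter_map]
    by_cases hG : ((PySem.Set.ofList g).length == g.length
        && PySem.Set.isdisjoint used (PySem.Set.ofList g)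
        && decide (count + g.length ≤ target)) = true
    · obtain ⟨⟨hb1, hb2⟩, hb3⟩ := by
        have := hG; simp only [Bool.and_eq_true] at this; exact this
      have hg : g.Nodup := (pv_set_len_iff g).mp (by simpa using hb1)
      have hd : ∀ x ∈ used, x ∉ g := by
        intro x hx
        have := (PySem.Set.isdisjoint_iff used (PySem.Set.ofList g)).mp hb2 x hx
        simpa [PySem.Set.mem_ofList] using this
      have hle : count + g.length ≤ target := by simpa using hb3
      rw [if_pos hG,
        ih (PySem.Set.union used (PySem.Set.ofList g)) (count + g.length)
          (PySem.Set.nodup_union used _ hu)]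
      rw [ih used count hu]
      congr 1
      apply congrArg
      apply List.filter_congr
      intro s _
      simp only [Function.comp_apply]
      show pvCheck target (PySem.Set.union used (PySem.Set.ofList g)) (count + g.length) s
          = pvCheck target used count (g :: s)
      simp only [pvCheck, List.flatMap_cons, id_eq, List.length_append]
      apply decide_eq_decide.mpr
      constructor
      · rintro ⟨h1, h2, h3⟩
        refine ⟨?_, ?_, by simpa [Nat.add_assoc] using h3⟩
        · rw [List.nodup_append]
          refine ⟨hg, h1, ?_⟩
          intro a ha b hb heq
          exact h2 a ((PySem.Set.mem_union used _ a).mpr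
            (Or.inr ((PySem.Set.mem_ofList g a).mpr ha))) (by rw [heq]; exact hb)
        · intro x hx
          simp only [List.mem_append, not_or]
          exact ⟨hd x hx, h2 x ((PySem.Set.mem_union used _ x).mpr (Or.inl hx))⟩
      · rintro ⟨h1, h2, h3⟩
        rw [List.nodup_append] at h1
        refine ⟨h1.2.1, ?_, by omega⟩
        intro x hx
        rcases (PySem.Set.mem_union used _ x).mp hx with hxu | hxg
        · have hthis := h2 x hxu
          simp only [List.mem_append, not_or] at hthis
          exact hthis.2
        · exact fun hxf => h1.2.2 x ((PySem.Set.mem_ofList g x).mp hxg) x hxf rfl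
    · rw [if_neg hG]
      have hnil : ((pvSubs vs).filter ((pvCheck target used count) ∘ (g :: ·))) = [] := by
        apply List.filter_eq_nil_iff.mpr
        intro s _ hchk
        simp only [Function.comp_apply, pvCheck, List.flatMap_cons, id_eq,
          List.length_append, decide_eq_true_eq] at hchk
        obtain ⟨h1, h2, h3⟩ := hchk
        apply hG
        rw [List.nodup_append] at h1
        have hg : (PySem.Set.ofList g).length = g.length := (pv_set_len_iff g).mpr h1.1
        have hd : PySem.Set.isdisjoint used (PySem.Set.ofList g) = true := by
          apply (PySem.Set.isdisjoint_iff used (PySem.Set.ofList g)).mpr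
          intro x hx
          have hxx := h2 x hx
          simp only [List.mem_append, not_or] at hxx
          simpa [PySem.Set.mem_ofList] using hxx.1
        rw [hg, hd]
        simp only [beq_self_eq_true, Bool.true_and, Bool.and_true, decide_eq_true_eq]
        omega
      rw [hnil]
      simpa using ih used count hu

lemma pv_foldl_snoc_if {α : Type} (p : α → Bool) :
    ∀ (l : List α) (acc : List α),
      l.foldl (fun r x => if p x then r ++ [x] else r) acc = acc ++ l.filter p := by
  intro l
  induction l with
  | nil => intro acc; simp
  | cons x l ih =>
    intro acc
    by_cases h : p x <;> simp [List.foldl_cons, h, ih]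

lemma pv_main (ages : List (String × Int)) (vs : List (List String)) :
    subgroups_brute_force ages vs = subgroups_brute_force_alt ages vs := by
  unfold subgroups_brute_force subgroups_brute_force_alt
  set L := (PySem.Dict.ofList ages).size with hL
  have hA : ∀ (k0 : Nat) (res : List (List (List String))),
      (pvCombos (k0 + 1) vs).foldl (fun r groups =>
        let children := groups.flatMap id
        if (PySem.Set.ofList children).length == children.length && children.length == L
        then r ++ [groups] else r) res
      = res ++ (pvCombos (k0 + 1) vs).filter (fun groups =>
          (PySem.Set.ofList (groups.flatMap id)).length == (groups.flatMap id).length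
            && (groups.flatMap id).length == L) := by
    intro k0 res
    exact pv_foldl_snoc_if _ (pvCombos (k0 + 1) vs) res
  calc (List.range vs.length).foldl (fun result k0 =>
        (pvCombos (k0 + 1) vs).foldl (fun r groups =>
          let children := groups.flatMap id
          if (PySem.Set.ofList children).length == children.length && children.length == L
          then r ++ [groups] else r) result) []
      = (List.range vs.length).foldl (fun result k0 =>
          result ++ (pvCombos (k0 + 1) vs).filter (fun groups =>
            (PySem.Set.ofList (groups.flatMap id)).length == (groups.flatMap id).length
              && (groups.flatMap id).length == L)) [] := by
        have hfun : (fun (result : List (List (List String))) k0 =>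
            (pvCombos (k0 + 1) vs).foldl (fun r groups =>
              let children := groups.flatMap id
              if (PySem.Set.ofList children).length == children.length && children.length == L
              then r ++ [groups] else r) result)
            = (fun result k0 => result ++ (pvCombos (k0 + 1) vs).filter (fun groups =>
                (PySem.Set.ofList (groups.flatMap id)).length == (groups.flatMap id).length
                  && (groups.flatMap id).length == L)) := by
          funext r k0
          exact hA k0 r
        rw [hfun]
    _ = (List.range vs.length).flatMap (fun k0 =>
          (pvCombos (k0 + 1) vs).filter (fun groups =>
            (PySem.Set.ofList (groups.flatMap id)).length == (groups.flatMap id).length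
              && (groups.flatMap id).length == L)) := by
        simpa using PySem.List.foldl_append_eq_flatMap _ (List.range vs.length) []
    _ = (List.range vs.length).flatMap (fun k0 =>
          ((pvDfs L vs PySem.Set.empty 0).filter (fun s => !s.isEmpty)).filter
            (fun s => s.length == k0 + 1)) := by
        have hdfs : pvDfs L vs PySem.Set.empty 0 = (pvSubs vs).filter (pvCheck L [] 0) :=
          pv_dfs_eq L vs PySem.Set.empty 0 List.nodup_nil
        have hk : ∀ k0 : Nat,
            (pvCombos (k0 + 1) vs).filter (fun groups =>
              (PySem.Set.ofList (groups.flatMap id)).length == (groups.flatMap id).length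
                && (groups.flatMap id).length == L)
            = ((pvDfs L vs PySem.Set.empty 0).filter (fun s => !s.isEmpty)).filter
                (fun s => s.length == k0 + 1) := by
          intro k0
          rw [hdfs, List.filter_filter, List.filter_filter,
            ← pv_subs_filter_len vs (k0 + 1), List.filter_filter]
          apply List.filter_congr
          intro s _
          cases s with
          | nil => simp [pvCheck]
          | cons a t =>
            simp only [pvCheck]
            rw [Bool.eq_iff_iff]
            simp only [Bool.and_eq_true, beq_iff_eq, decide_eq_true_eq, List.not_mem_nil,
              List.isEmpty_cons, Bool.not_false, List.length_cons, pv_set_len_iff,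
              Nat.zero_add]
            tauto
        simp only [hk]
    _ = (List.range vs.length).foldl (fun result k0 =>
          result ++ ((pvDfs L vs PySem.Set.empty 0).filter (fun s => !s.isEmpty)).filter
            (fun s => s.length == k0 + 1)) [] := by
        simpa using (PySem.List.foldl_append_eq_flatMap _ (List.range vs.length) []).symm

-- ===== VERDICT (by name: the statement is the Claim_ definition above) =====
theorem subgroups_brute_force_spec : Claim_equal_subgroups_brute_force := by
  intro ages vs _
  exact pv_main ages vs
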